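-- pv_equiv track=rewrite | github.com/jiyeon2536/algorithm | 프로그래머스/2/77885. 2개 이하로 다른 비트/2개 이하로 다른 비트.py | solution
-- ===== SOURCE A (Python) =====
-- def solution(numbers):
--     answer = []
--     for num in numbers:
--         i = 1
--         while True:
--             if (num & i) == 0:
--                 num |= i
--                 num ^= (i >> 1)
--                 break
--             i <<= 1
--         answer.append(num)
--
--     return answer
-- ===== SOURCE B (Python) =====
-- def solution(numbers):
--     # Closed form: the lowest zero bit of num is the lowest set bit of ~num,
--     # i.e. low = ~num & (num + 1); set it and clear the bit below it.
--     def flip(num):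
--         low = ~num & (num + 1)
--         return (num | low) ^ (low >> 1)
--     return [flip(num) for num in numbers]
-- ===== Notes on version B (the rewrite author's own statement) =====
-- stated objective: alternative
-- what changed: Replaces A's bit-by-bit while-loop search for the lowest zero bit with the branch-free closed form low = ~num & (num+1), computing each result in O(1) bit operations instead of a scan.
import Mathlib
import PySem

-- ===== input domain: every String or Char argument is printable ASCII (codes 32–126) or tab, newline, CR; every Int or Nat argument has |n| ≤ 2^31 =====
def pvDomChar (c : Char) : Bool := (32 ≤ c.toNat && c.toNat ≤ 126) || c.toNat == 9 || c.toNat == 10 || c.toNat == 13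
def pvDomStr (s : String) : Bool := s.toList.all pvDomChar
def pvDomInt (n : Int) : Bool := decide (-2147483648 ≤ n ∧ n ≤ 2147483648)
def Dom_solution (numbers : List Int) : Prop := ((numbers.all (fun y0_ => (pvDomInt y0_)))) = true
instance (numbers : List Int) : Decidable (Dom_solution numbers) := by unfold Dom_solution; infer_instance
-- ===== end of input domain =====

-- B replaces A's bit-by-bit while-loop with the closed form low = ~num & (num+1); equal on every
-- list not containing -1 (on which A's while-loop never terminates).

-- ===== PORT A =====
-- A's 'while True' loop; it terminates iff num has a zero bit, i.e. num ≠ -1.  The fuel 64 is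
-- never exhausted on the admitted inputs (|num| ≤ 2^31 and num ≠ -1 give at most 33 iterations).
def flipLoop (num : Int) (i : Int) : Nat → Int
  | 0 => num
  | fuel+1 =>
    if PySem.Int.band num i = 0 then
      PySem.Int.bxor (PySem.Int.bor num i) (i >>> (1:Nat))
    else flipLoop num (i <<< (1:Nat)) fuel

def solution (numbers : List Int) : List Int :=
  numbers.foldl (fun answer num => answer ++ [flipLoop num 1 64]) []

-- ===== PORT B =====
def flipAlt (num : Int) : Int :=
  let low : Int := PySem.Int.band (Int.not num) (num + 1)
  PySem.Int.bxor (PySem.Int.bor num low) (low >>> (1:Nat))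

def solution_alt (numbers : List Int) : List Int := numbers.map flipAlt

-- ===== PRECONDITION & SPEC =====
-- Pre_ excludes exactly the lists containing -1, on which A's while-loop never terminates
-- (-1 has no zero bit); A returns normally on every other input.
def Pre_solution (numbers : List Int) : Prop := (-1 : Int) ∉ numbers
instance (numbers : List Int) : Decidable (Pre_solution numbers) := by unfold Pre_solution; infer_instance
def pvWitness_solution : List Int := [0, 2, 7, -6]

def Spec_solution (numbers : List Int) (out : List Int) : Prop := out = solution_alt numbers
instance (numbers : List Int) (out : List Int) : Decidable (Spec_solution numbers out) := by unfold Spec_solution; infer_instance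

-- ===== CLAIM (what is proved, stated in full; the proofs are below) =====
def Claim_equal_solution : Prop := ∀ (numbers : List Int), Dom_solution numbers → Pre_solution numbers → Spec_solution numbers (solution numbers)

-- ===== LEMMAS AND PROOFS =====

theorem pv_int_not_eq (n : Int) : Int.not n = -n - 1 := by
  cases n <;> simp [Int.not, Int.negSucc_eq] <;> ring

theorem pv_shl_one (x : Int) : x <<< (1:Nat) = x * 2 := by
  rw [Int.shiftLeft_eq]; ring

-- bit j of 2^k * M, for j ≤ k
theorem pv_testBit_mul (k : Nat) (M : Nat) (j : Nat) :
    (2^k * M).testBit j = if j < k then false else M.testBit (j - k) := by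
  have h := Nat.testBit_two_pow_mul_add M (b := 0) (i := k) (by positivity) j
  simpa using h

-- bit j of 2^k * M - 1 (M ≥ 1)
theorem pv_testBit_mul_pred (k : Nat) (M : Nat) (hM : 1 ≤ M) (j : Nat) :
    (2^k * M - 1).testBit j = if j < k then (2^k - 1).testBit j else (M - 1).testBit (j - k) := by
  have hc : 1 ≤ 2^k := Nat.one_le_two_pow
  have hd : 2^k * M = 2^k * (M - 1) + 2^k := by
    have h2 : M - 1 + 1 = M := by omega
    calc 2^k * M = 2^k * (M - 1 + 1) := by rw [h2]
    _ = 2^k * (M - 1) + 2^k := by ring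
  have he : 2^k * M - 1 = 2^k * (M - 1) + (2^k - 1) := by omega
  rw [he, Nat.testBit_two_pow_mul_add (M - 1) (by omega) j]

theorem pv_testBit_zero_mod (M : Nat) : M.testBit 0 = decide (M % 2 = 1) := by
  rw [Nat.testBit_eq_decide_div_mod_eq]; simp

-- the core identity: for odd M, (2^k*M) &&& (2^k*M - 1) = 2^k*M - 2^k
theorem pv_and_pred (k M : Nat) (hM : M % 2 = 1) :
    (2^k * M) &&& (2^k * M - 1) = 2^k * M - 2^k := by
  have hc : 1 ≤ 2^k := Nat.one_le_two_pow
  have hd : 2^k * M = 2^k * (M - 1) + 2^k := by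
    have h2 : M - 1 + 1 = M := by omega
    calc 2^k * M = 2^k * (M - 1 + 1) := by rw [h2]
    _ = 2^k * (M - 1) + 2^k := by ring
  have hR : 2^k * M - 2^k = 2^k * (M - 1) := by omega
  apply Nat.eq_of_testBit_eq
  intro i
  rw [Nat.testBit_land, pv_testBit_mul, pv_testBit_mul_pred k M (by omega), hR, pv_testBit_mul]
  by_cases hik : i < k
  · simp [hik]
  · simp only [hik, if_false]
    rcases Nat.eq_zero_or_pos (i - k) with h0 | hpos
    · rw [h0, pv_testBit_zero_mod, pv_testBit_zero_mod]
      have : (M - 1) % 2 = 0 := by omega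
      simp [hM, this]
    · obtain ⟨e, he⟩ : ∃ e, i - k = e + 1 := ⟨i - k - 1, by omega⟩
      rw [he, Nat.testBit_add_one, Nat.testBit_add_one]
      have : M / 2 = (M - 1) / 2 := by omega
      rw [this, Bool.and_self]

theorem pv_low_nat (k M : Nat) (hM : M % 2 = 1) :
    2^k * M - (2^k * M &&& (2^k * M - 1)) = 2^k := by
  have hc : 1 ≤ 2^k := Nat.one_le_two_pow
  have hle : 2^k ≤ 2^k * M := by
    calc 2^k = 2^k * 1 := by ring
    _ ≤ 2^k * M := Nat.mul_le_mul_left _ (by omega)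
  rw [pv_and_pred k M hM]; omega

-- ~n & (n+1) = 2^k when n+1 = 2^k * m with m odd
theorem pv_band_low (k : Nat) (m n : Int) (hm : ¬ (2:Int) ∣ m) (h : n + 1 = 2^k * m) :
    PySem.Int.band (Int.not n) (n + 1) = 2^k := by
  have hcI : (0:Int) < 2^k := by positivity
  have hm0 : m ≠ 0 := by rintro rfl; exact hm ⟨0, by ring⟩
  have hne : n ≠ -1 := by
    intro hE; rw [hE] at h
    have h0 : (2:Int)^k * m = 0 := by omega
    rcases mul_eq_zero.mp h0 with h' | h'
    · exact (ne_of_gt hcI) h'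
    · exact hm0 h'
  by_cases hn : 0 ≤ n
  · -- n ≥ 0: m > 0
    have hmpos : 0 < m := by nlinarith
    set M : Nat := m.toNat with hMdef
    have hmM : m = (M : Int) := by omega
    have hcast : ((2^k * M : Nat) : Int) = n + 1 := by rw [h, hmM]; push_cast; ring
    have hModd : M % 2 = 1 := by omega
    rw [pv_int_not_eq]
    simp only [PySem.Int.band]
    rw [if_neg (by omega), if_pos (by omega)]
    have e1 : (n + 1).toNat = 2^k * M := by omega
    have e2 : (-(-n - 1) - 1).toNat = 2^k * M - 1 := by omega
    rw [e1, e2, pv_low_nat k M hModd]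
    norm_cast
  · -- n ≤ -2: m < 0
    push_neg at hn
    have hmneg : m < 0 := by
      rcases lt_trichotomy m 0 with h' | h' | h'
      · exact h'
      · exact absurd h' hm0
      · exfalso
        have hpos2 : 0 < (2:Int)^k * m := mul_pos hcI h'
        omega
    set M : Nat := (-m).toNat with hMdef
    have hmM : m = -(M : Int) := by omega
    have hcast : ((2^k * M : Nat) : Int) = -(n + 1) := by rw [h, hmM]; push_cast; ring
    have hModd : M % 2 = 1 := by omega
    have hn2 : n ≤ -2 := by omega
    rw [pv_int_not_eq]
    simp only [PySem.Int.band]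
    rw [if_pos (by omega), if_neg (by omega)]
    have e1 : (-n - 1).toNat = 2^k * M := by omega
    have e2 : (-(n + 1) - 1).toNat = 2^k * M - 1 := by omega
    rw [e1, e2, pv_low_nat k M hModd]
    norm_cast

theorem pv_pow_toNat (j : Nat) : ((2:Int)^j).toNat = 2^j := by
  rw [show ((2:Int)^j) = ((2^j : Nat) : Int) from by push_cast; ring, Int.toNat_natCast]

-- n & 2^j for j < k (bit j of n is set)
theorem pv_band_bit_lt (k j : Nat) (m n : Int) (hm : ¬ (2:Int) ∣ m) (h : n + 1 = 2^k * m)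
    (hj : j < k) : PySem.Int.band n ((2:Int)^j) = (2:Int)^j := by
  have hcI : (0:Int) < 2^k := by positivity
  have hcJ : (0:Int) ≤ 2^j := by positivity
  have hm0 : m ≠ 0 := by rintro rfl; exact hm ⟨0, by ring⟩
  have hjk : (2:Nat)^j ≤ 2^k := Nat.pow_le_pow_right (by norm_num) (by omega)
  have hne : n ≠ -1 := by
    intro hE; rw [hE] at h
    have h0 : (2:Int)^k * m = 0 := by omega
    rcases mul_eq_zero.mp h0 with h' | h'
    · exact (ne_of_gt hcI) h'
    · exact hm0 h'
  by_cases hn : 0 ≤ n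
  · have hmpos : 0 < m := by nlinarith
    set M : Nat := m.toNat with hMdef
    have hmM : m = (M : Int) := by omega
    have hcast : ((2^k * M : Nat) : Int) = n + 1 := by rw [h, hmM]; push_cast; ring
    have hModd : M % 2 = 1 := by omega
    simp only [PySem.Int.band]
    rw [if_pos (by omega), if_pos (by omega)]
    have e1 : n.toNat = 2^k * M - 1 := by omega
    rw [e1, pv_pow_toNat, Nat.and_two_pow, pv_testBit_mul_pred k M (by omega) j,
      if_pos hj, Nat.testBit_two_pow_sub_one, decide_eq_true hj]
    simp only [Bool.toNat_true, one_mul]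
    norm_cast
  · push_neg at hn
    set M : Nat := (-m).toNat with hMdef
    have hmneg : m < 0 := by
      rcases lt_trichotomy m 0 with h' | h' | h'
      · exact h'
      · exact absurd h' hm0
      · exfalso
        have hpos2 : 0 < (2:Int)^k * m := mul_pos hcI h'
        omega
    have hmM : m = -(M : Int) := by omega
    have hcast : ((2^k * M : Nat) : Int) = -(n + 1) := by rw [h, hmM]; push_cast; ring
    have hModd : M % 2 = 1 := by omega
    simp only [PySem.Int.band]
    rw [if_neg (by omega), if_pos (by omega)]
    have e1 : (-n - 1).toNat = 2^k * M := by omega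
    rw [e1, pv_pow_toNat, Nat.two_pow_and, pv_testBit_mul, if_pos hj]
    simp only [Bool.toNat_false, Nat.mul_zero, Nat.sub_zero]
    norm_cast

-- n & 2^k = 0 (bit k of n is clear)
theorem pv_band_bit_eq (k : Nat) (m n : Int) (hm : ¬ (2:Int) ∣ m) (h : n + 1 = 2^k * m) :
    PySem.Int.band n ((2:Int)^k) = 0 := by
  have hcI : (0:Int) < 2^k := by positivity
  have hm0 : m ≠ 0 := by rintro rfl; exact hm ⟨0, by ring⟩
  have hne : n ≠ -1 := by
    intro hE; rw [hE] at h
    have h0 : (2:Int)^k * m = 0 := by omega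
    rcases mul_eq_zero.mp h0 with h' | h'
    · exact (ne_of_gt hcI) h'
    · exact hm0 h'
  by_cases hn : 0 ≤ n
  · have hmpos : 0 < m := by nlinarith
    set M : Nat := m.toNat with hMdef
    have hmM : m = (M : Int) := by omega
    have hcast : ((2^k * M : Nat) : Int) = n + 1 := by rw [h, hmM]; push_cast; ring
    have hModd : M % 2 = 1 := by omega
    simp only [PySem.Int.band]
    rw [if_pos (by omega), if_pos (by omega)]
    have e1 : n.toNat = 2^k * M - 1 := by omega
    rw [e1, pv_pow_toNat, Nat.and_two_pow, pv_testBit_mul_pred k M (by omega) k,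
      if_neg (by omega)]
    have hb : (M - 1).testBit (k - k) = false := by
      rw [Nat.sub_self, pv_testBit_zero_mod]
      have : (M - 1) % 2 = 0 := by omega
      simp [this]
    rw [hb]; simp
  · push_neg at hn
    set M : Nat := (-m).toNat with hMdef
    have hmneg : m < 0 := by
      rcases lt_trichotomy m 0 with h' | h' | h'
      · exact h'
      · exact absurd h' hm0
      · exfalso
        have hpos2 : 0 < (2:Int)^k * m := mul_pos hcI h'
        omega
    have hmM : m = -(M : Int) := by omega
    have hcast : ((2^k * M : Nat) : Int) = -(n + 1) := by rw [h, hmM]; push_cast; ring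
    have hModd : M % 2 = 1 := by omega
    simp only [PySem.Int.band]
    rw [if_neg (by omega), if_pos (by omega)]
    have e1 : (-n - 1).toNat = 2^k * M := by omega
    rw [e1, pv_pow_toNat, Nat.two_pow_and, pv_testBit_mul, if_neg (by omega)]
    have hb : M.testBit (k - k) = true := by
      rw [Nat.sub_self, pv_testBit_zero_mod]; simp [hModd]
    rw [hb]; simp

-- the loop, started at i = 2^j with j ≤ k and enough fuel, computes B's closed form
theorem pv_loop_eq (fuel : Nat) : ∀ (j k : Nat) (m n : Int), ¬ (2:Int) ∣ m → n + 1 = 2^k * m →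
    j ≤ k → k - j < fuel → flipLoop n ((2:Int)^j) fuel = flipAlt n := by
  induction fuel with
  | zero => intro j k m n _ _ _ hf; omega
  | succ fuel ih =>
    intro j k m n hm h hjk hf
    by_cases hj : j = k
    · subst hj
      simp only [flipLoop]
      rw [if_pos (pv_band_bit_eq j m n hm h)]
      simp only [flipAlt]
      rw [pv_band_low j m n hm h]
    · simp only [flipLoop]
      have hnz : PySem.Int.band n ((2:Int)^j) ≠ 0 := by
        rw [pv_band_bit_lt k j m n hm h (by omega)]; positivity
      have hstep : ((2:Int)^j) <<< (1:Nat) = (2:Int)^(j+1) := by rw [pv_shl_one]; ring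
      rw [if_neg hnz, hstep]
      exact ih (j+1) k m n hm h (by omega) (by omega)

-- per-element equivalence on the admitted domain
theorem pv_flip_eq (n : Int) (h1 : -2147483648 ≤ n) (h2 : n ≤ 2147483648) (hn : n ≠ -1) :
    flipLoop n 1 64 = flipAlt n := by
  have hN : (n + 1).natAbs ≠ 0 := by omega
  obtain ⟨k, M, hM, hNe⟩ := Nat.exists_eq_pow_mul_and_not_dvd hN 2 (by norm_num)
  have hM1 : 1 ≤ M := by
    rcases Nat.eq_zero_or_pos M with h0 | h; · rw [h0, Nat.mul_zero] at hNe; omega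
    · omega
  have hMo : M % 2 = 1 := by omega
  set m : Int := if 0 ≤ n + 1 then (M : Int) else -(M : Int) with hmdef
  have hcast : ((2^k * M : Nat) : Int) = ((n+1).natAbs : Int) := by rw [hNe]
  have hpow : ((2^k * M : Nat) : Int) = (2:Int)^k * (M : Int) := by push_cast; ring
  have h : n + 1 = 2^k * m := by
    by_cases hs : 0 ≤ n + 1
    · rw [hmdef, if_pos hs, ← hpow, hcast]; omega
    · rw [hmdef, if_neg hs, mul_neg, ← hpow, hcast]; omega
  have hm : ¬ (2:Int) ∣ m := by
    by_cases hs : 0 ≤ n + 1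
    · rw [hmdef, if_pos hs]; omega
    · rw [hmdef, if_neg hs]; omega
  have hk : k < 64 := by
    by_contra hk'
    have h64 : (2:Nat)^64 ≤ 2^k := Nat.pow_le_pow_right (by norm_num) (by omega)
    have hle : (2:Nat)^k ≤ 2^k * M := by
      calc (2:Nat)^k = 2^k * 1 := by ring
      _ ≤ 2^k * M := Nat.mul_le_mul_left _ hM1
    have hval : (2:Nat)^64 = 18446744073709551616 := by norm_num
    omega
  have := pv_loop_eq 64 0 k m n hm h (by omega) (by omega)
  simpa using this

theorem pv_foldl_map (l : List Int) (hd : ∀ x ∈ l, pvDomInt x = true) (hp : (-1:Int) ∉ l) :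
    ∀ acc, l.foldl (fun answer num => answer ++ [flipLoop num 1 64]) acc = acc ++ l.map flipAlt := by
  induction l with
  | nil => intro acc; simp
  | cons x xs ih =>
    intro acc
    simp only [List.foldl_cons, List.map_cons]
    have hx : pvDomInt x = true := hd x (by simp)
    have hx' : -2147483648 ≤ x ∧ x ≤ 2147483648 := by
      simpa [pvDomInt] using hx
    rw [ih (fun y hy => hd y (by simp [hy])) (fun h => hp (by simp [h]))]
    rw [pv_flip_eq x hx'.1 hx'.2 (fun h => hp (by simp [h]))]
    simp

-- ===== VERDICT (by name: the statement is the Claim_ definition above) =====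
theorem solution_spec : Claim_equal_solution := by
  intro numbers hdom hpre
  unfold Spec_solution solution solution_alt
  have hd : ∀ x ∈ numbers, pvDomInt x = true := by
    intro x hx
    exact List.all_eq_true.mp hdom x hx
  have := pv_foldl_map numbers hd hpre []
  simpa using this
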